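-- pv_equiv track=rewrite | github.com/JohnReid/biopsy | Python/gapped_pssms/sites.py | yield_sites_from_states
-- ===== SOURCE A (Python) =====
-- def yield_sites_from_states(states, bg_states):
--     """
--     Yields (start, length) tuples, one per site in the state sequence.
--     """
--     in_site = False
--     site_start = -1
--     for i, q in enumerate(states):
--         is_bg = q in bg_states
--         # are we changing state in or out of site?
--         if is_bg == in_site:
--             # yes changing state...
--             if is_bg:
--                 # changing state out of site
--                 site_len = (i-site_start)
--                 yield site_start, site_len
--                 in_site = False
--             else:
--                 # changing state into site
--                 site_start = i
--                 in_site = True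
--     if in_site:
--         site_len = len(states) - site_start
--         yield site_start, site_len
-- ===== SOURCE B (Python) =====
-- def yield_sites_from_states(states, bg_states):
--     """
--     Yields (start, length) tuples, one per site in the state sequence.
--     Run-scanning version: advance over maximal runs of equal
--     background/non-background key; yield the non-background runs.
--     """
--     n = len(states)
--     i = 0
--     while i < n:
--         key = states[i] in bg_states
--         j = i + 1
--         while j < n and (states[j] in bg_states) == key:
--             j += 1
--         if not key:
--             yield (i, j - i)
--         i = j
-- ===== Notes on version B (the rewrite author's own statement) =====
-- stated objective: simpler
-- what changed: Replaces A's per-element in_site/site_start state machine with trailing-site epilogue by a run-scanning loop that finds each maximal run of equal background key and yields the non-background runs directly.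
import Mathlib
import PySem

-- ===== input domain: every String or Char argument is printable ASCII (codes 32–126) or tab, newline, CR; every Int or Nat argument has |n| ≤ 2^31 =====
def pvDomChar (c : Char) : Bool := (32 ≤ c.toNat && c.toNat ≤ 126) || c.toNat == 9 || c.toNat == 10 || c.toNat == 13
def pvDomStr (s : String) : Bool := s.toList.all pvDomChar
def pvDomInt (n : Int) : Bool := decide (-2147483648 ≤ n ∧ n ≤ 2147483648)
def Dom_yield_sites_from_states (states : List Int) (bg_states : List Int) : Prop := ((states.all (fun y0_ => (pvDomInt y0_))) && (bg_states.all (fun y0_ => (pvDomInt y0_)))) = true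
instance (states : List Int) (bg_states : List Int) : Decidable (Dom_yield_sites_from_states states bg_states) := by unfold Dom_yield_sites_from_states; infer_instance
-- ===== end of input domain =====

-- B replaces A's per-element in_site/site_start state machine (with its trailing-site
-- epilogue) by a run-scanning loop over maximal runs of equal background key: simpler.

-- ===== PORT A =====
-- the for-loop over enumerate(states): state (in_site, site_start), i is the running index;
-- at the end of the list i = len(states), so the trailing branch uses i there.
def pvALoop (bg : List Int) (i : Int) (in_site : Bool) (site_start : Int) :
    List Int → List (Int × Int)
  | [] => if in_site then [(site_start, i - site_start)] else []
  | q :: rest =>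
    let is_bg := bg.contains q
    if is_bg == in_site then
      if is_bg then (site_start, i - site_start) :: pvALoop bg (i + 1) false site_start rest
      else pvALoop bg (i + 1) true i rest
    else pvALoop bg (i + 1) in_site site_start rest

def yield_sites_from_states (states : List Int) (bg_states : List Int) : List (Int × Int) :=
  pvALoop bg_states 0 false (-1) states

-- ===== PORT B =====
-- the outer while: take the maximal run sharing the head's background key,
-- yield it if non-background, continue after it.
def pvBLoop (bg : List Int) (i : Int) : List Int → List (Int × Int)
  | [] => []
  | q :: rest =>
    let key := bg.contains q
    let run := (q :: rest).takeWhile (fun x => bg.contains x == key)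
    let rest' := (q :: rest).dropWhile (fun x => bg.contains x == key)
    if key then pvBLoop bg (i + run.length) rest'
    else (i, (run.length : Int)) :: pvBLoop bg (i + run.length) rest'
  termination_by l => l.length
  decreasing_by
    all_goals
      rw [List.dropWhile_cons_of_pos (by simp)]
      exact Nat.lt_succ_of_le (List.length_dropWhile_le _ _)

def yield_sites_from_states_alt (states : List Int) (bg_states : List Int) : List (Int × Int) :=
  pvBLoop bg_states 0 states

-- ===== PRECONDITION & SPEC =====
def Spec_yield_sites_from_states (states : List Int) (bg_states : List Int) (out : List (Int × Int)) : Prop := out = yield_sites_from_states_alt states bg_states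
instance (states : List Int) (bg_states : List Int) (out : List (Int × Int)) : Decidable (Spec_yield_sites_from_states states bg_states out) := by unfold Spec_yield_sites_from_states; infer_instance

-- ===== CLAIM (what is proved, stated in full; the proofs are below) =====
def Claim_equal_yield_sites_from_states : Prop := ∀ (states : List Int) (bg_states : List Int), Dom_yield_sites_from_states states bg_states → Spec_yield_sites_from_states states bg_states (yield_sites_from_states states bg_states)

-- ===== LEMMAS AND PROOFS =====

-- when the head's key is 'background', the run predicate is just membership
theorem pvPred_true (bg : List Int) (r : Int) (h : bg.contains r = true) :
    (fun x => bg.contains x == bg.contains r) = (fun x => bg.contains x) := by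
  funext x; rw [h]; simp

-- skipping one background element leaves pvBLoop unchanged (index advances by one)
theorem pvBLoop_cons_bg (bg : List Int) (i : Int) (r : Int) (rs : List Int)
    (h : bg.contains r = true) : pvBLoop bg i (r :: rs) = pvBLoop bg (i + 1) rs := by
  have hm : r ∈ bg := by simpa using h
  rw [pvBLoop]
  rw [List.takeWhile_cons_of_pos (by simp [hm]), List.dropWhile_cons_of_pos (by simp [hm])]
  rw [if_pos h, pvPred_true bg r h]
  cases rs with
  | nil =>
    simp only [List.takeWhile_nil, List.dropWhile_nil]
    rw [pvBLoop, pvBLoop]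
  | cons s ss =>
    by_cases hs : bg.contains s = true
    · have hsm : s ∈ bg := by simpa using hs
      conv_rhs => rw [pvBLoop]
      rw [List.takeWhile_cons_of_pos (by simp [hsm]), List.dropWhile_cons_of_pos (by simp [hsm]),
          List.takeWhile_cons_of_pos (by simp [hsm]), List.dropWhile_cons_of_pos (by simp [hsm])]
      rw [if_pos hs, pvPred_true bg s hs]
      congr 1
      simp only [List.length_cons]
      push_cast; ring
    · have hsm : s ∉ bg := by simpa using hs
      rw [List.takeWhile_cons_of_neg (by simp [hsm]), List.dropWhile_cons_of_neg (by simp [hsm])]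
      norm_num

-- mutual invariant: out of a site pvALoop agrees with pvBLoop (any site_start);
-- inside a site started at ss, pvALoop emits (ss, end-ss) for the current non-bg run
-- and then agrees with pvBLoop after that run.
theorem pvAB (bg : List Int) (l : List Int) :
    (∀ i ss, pvALoop bg i false ss l = pvBLoop bg i l) ∧
    (∀ i ss, pvALoop bg i true ss l =
      (ss, i + ((l.takeWhile (fun x => bg.contains x == false)).length : Int) - ss)
        :: pvBLoop bg (i + ((l.takeWhile (fun x => bg.contains x == false)).length : Int))
            (l.dropWhile (fun x => bg.contains x == false))) := by
  induction l with
  | nil =>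
    constructor <;> intro i ss <;> rw [pvALoop] <;> simp [pvBLoop]
  | cons q t ih =>
    obtain ⟨ihP, ihQ⟩ := ih
    by_cases hq : bg.contains q = true
    · have hm : q ∈ bg := by simpa using hq
      constructor
      · intro i ss
        rw [pvALoop]
        simp only [hq]
        rw [if_neg (by decide)]
        rw [ihP, pvBLoop_cons_bg bg i q t hq]
      · intro i ss
        rw [pvALoop]
        simp only [hq]
        rw [if_pos (by decide), if_pos trivial]
        rw [ihP, ← pvBLoop_cons_bg bg i q t hq]
        rw [List.takeWhile_cons_of_neg (by simp [hm]), List.dropWhile_cons_of_neg (by simp [hm])]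
        simp
    · have hm : q ∉ bg := by simpa using hq
      have hq' : bg.contains q = false := by simpa using hq
      have hk : (fun x => bg.contains x == bg.contains q) = (fun x => bg.contains x == false) := by
        funext x; rw [hq']
      constructor
      · intro i ss
        rw [pvALoop]
        simp only [hq']
        rw [if_pos (by decide), if_neg (by decide)]
        rw [ihQ (i + 1) i]
        conv_rhs => rw [pvBLoop]
        rw [hk, if_neg (by simp [hm])]
        rw [List.takeWhile_cons_of_pos (by simp [hm]), List.dropWhile_cons_of_pos (by simp [hm])]
        simp only [List.cons.injEq, Prod.mk.injEq, List.length_cons]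
        refine ⟨⟨by trivial, by push_cast; ring⟩, by congr 1; push_cast; ring⟩
      · intro i ss
        rw [pvALoop]
        simp only [hq']
        rw [if_neg (by decide)]
        rw [ihQ (i + 1) ss]
        rw [List.takeWhile_cons_of_pos (by simp [hm]), List.dropWhile_cons_of_pos (by simp [hm])]
        simp only [List.cons.injEq, Prod.mk.injEq, List.length_cons]
        refine ⟨⟨by trivial, by push_cast; ring⟩, by congr 1; push_cast; ring⟩

-- ===== VERDICT (by name: the statement is the Claim_ definition above) =====
theorem yield_sites_from_states_spec : Claim_equal_yield_sites_from_states := by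
  intro states bg_states _
  unfold Spec_yield_sites_from_states yield_sites_from_states yield_sites_from_states_alt
  exact (pvAB bg_states states).1 0 (-1)
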